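-- pv_equiv track=rewrite | github.com/yashpandey474/Competitive-Coding | CodeForces/the_corridor.py | maxK
-- ===== SOURCE A (Python) =====
-- def maxK(traps):
--     i = 1
--
--     while i:
--         found = False
--         for j in traps:
--             if j >= i:
--                 continue
--             if j - 1 + traps[j] <=  (i - 1) + (i - j):
--                 found = True
--                 break
--
--         if found:
--             break
--         i += 1
--
--     return i - 1
-- ===== SOURCE B (Python) =====
-- def maxK(traps):
--     # Closed form: trap j (with delay t) first catches a start i >= j + max(1, ceil(t/2));
--     # the answer is the largest i below the smallest such threshold (never below 0).
--     return max(1, min(j + max(1, (t + 1) // 2) for j, t in traps.items())) - 1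
-- ===== Notes on version B (the rewrite author's own statement) =====
-- stated objective: alternative
-- what changed: Replaces A's unbounded trial loop over candidate indices (each rescanning every trap) with a single pass computing each trap's closed-form minimal catching index and taking the minimum.
-- outside the precondition, e.g. on maxK({}): A does not finish within the time limit, B raises ValueError
import Mathlib
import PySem

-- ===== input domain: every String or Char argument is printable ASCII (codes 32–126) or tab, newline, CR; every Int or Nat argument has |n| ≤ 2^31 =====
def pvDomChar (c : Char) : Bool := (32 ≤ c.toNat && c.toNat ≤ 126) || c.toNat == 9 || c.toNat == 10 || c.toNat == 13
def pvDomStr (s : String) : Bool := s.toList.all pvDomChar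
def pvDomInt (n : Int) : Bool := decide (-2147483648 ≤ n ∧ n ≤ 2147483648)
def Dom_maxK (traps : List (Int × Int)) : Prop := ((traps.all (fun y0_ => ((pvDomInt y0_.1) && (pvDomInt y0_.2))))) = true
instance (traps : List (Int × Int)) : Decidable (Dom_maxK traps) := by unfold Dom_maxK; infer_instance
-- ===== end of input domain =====

-- B replaces A's trial loop over candidate indices with a one-pass closed-form minimum (objective: alternative).

-- ===== PORT A =====
-- the inner 'for j in traps: if j >= i: continue; if j - 1 + traps[j] <= (i-1)+(i-j): found = True; break'
def maxK_found (traps : List (Int × Int)) (i : Int) : Bool :=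
  traps.any (fun p =>
    !(decide (p.1 ≥ i)) &&
    decide (p.1 - 1 + PySem.Dict.getD (PySem.Dict.mk traps) p.1 0 ≤ (i - 1) + (i - p.1)))

-- the 'while i:' loop; fuel is only a totality guard (Pre_ guarantees it is enough)
def maxK_loop (traps : List (Int × Int)) (i : Int) : Nat → Int
  | 0 => i - 1
  | Nat.succ fuel => if maxK_found traps i then i - 1 else maxK_loop traps (i + 1) fuel

def maxK_fuel (traps : List (Int × Int)) : Nat :=
  ((traps.map (fun p => p.1 + max 1 (PySem.Int.floordiv (p.2 + 1) 2))).foldl max 1).toNat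

def maxK (traps : List (Int × Int)) : Int :=
  maxK_loop traps 1 (maxK_fuel traps)

-- ===== PORT B =====
def maxK_alt (traps : List (Int × Int)) : Int :=
  max 1 ((PySem.List.min?
    (traps.map (fun p => p.1 + max 1 (PySem.Int.floordiv (p.2 + 1) 2)))
    (fun x => x)).getD 0) - 1

-- ===== PRECONDITION & SPEC =====
-- Pre_ excludes the empty dict, on which A loops forever, and duplicate keys, which cannot
-- occur in the Python dict A receives (the assoc-list form is ambiguous there).
def Pre_maxK (traps : List (Int × Int)) : Prop :=
  traps ≠ [] ∧ (traps.map Prod.fst).Nodup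
instance (traps : List (Int × Int)) : Decidable (Pre_maxK traps) := by unfold Pre_maxK; infer_instance

def pvWitness_maxK : (List (Int × Int)) := [(0, 2), (3, 5)]

def Spec_maxK (traps : List (Int × Int)) (out : Int) : Prop := out = maxK_alt traps
instance (traps : List (Int × Int)) (out : Int) : Decidable (Spec_maxK traps out) := by unfold Spec_maxK; infer_instance

-- ===== CLAIM (what is proved, stated in full; the proofs are below) =====
def Claim_equal_maxK : Prop := ∀ (traps : List (Int × Int)), Dom_maxK traps → Pre_maxK traps → Spec_maxK traps (maxK traps)

-- ===== LEMMAS AND PROOFS =====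

-- the closed-form threshold B computes for one trap
def maxK_bnd (p : Int × Int) : Int := p.1 + max 1 (PySem.Int.floordiv (p.2 + 1) 2)

-- A's inner-loop condition for one trap is exactly 'threshold ≤ i'
lemma maxK_cond_iff (p : Int × Int) (i : Int) :
    ((!(decide (p.1 ≥ i)) && decide (p.1 - 1 + p.2 ≤ (i - 1) + (i - p.1))) = true)
      ↔ maxK_bnd p ≤ i := by
  unfold maxK_bnd
  rw [PySem.Int.floordiv_eq_ediv_of_pos (by norm_num : (0:Int) < 2)]
  simp only [Bool.and_eq_true, Bool.not_eq_eq_eq_not, Bool.not_true, decide_eq_false_iff_not,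
    decide_eq_true_eq, not_le]
  omega

lemma maxK_getD_eq (traps : List (Int × Int)) (h : (traps.map Prod.fst).Nodup)
    (p : Int × Int) (hp : p ∈ traps) :
    PySem.Dict.getD (PySem.Dict.mk traps) p.1 0 = p.2 := by
  apply PySem.Dict.getD_of_mem_items (k := p.1) (v := p.2)
  · exact hp
  · simpa [PySem.Dict.keys] using h

lemma maxK_found_iff (traps : List (Int × Int)) (h : (traps.map Prod.fst).Nodup) (i : Int) :
    maxK_found traps i = true ↔ ∃ p ∈ traps, maxK_bnd p ≤ i := by
  unfold maxK_found
  rw [List.any_eq_true]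
  constructor
  · rintro ⟨p, hp, hc⟩
    rw [maxK_getD_eq traps h p hp] at hc
    exact ⟨p, hp, (maxK_cond_iff p i).mp hc⟩
  · rintro ⟨p, hp, hb⟩
    refine ⟨p, hp, ?_⟩
    rw [maxK_getD_eq traps h p hp]
    exact (maxK_cond_iff p i).mpr hb

lemma maxK_loop_eq (traps : List (Int × Int)) (istar : Int)
    (hfind : ∀ k : Int, 1 ≤ k → (maxK_found traps k = true ↔ istar ≤ k)) :
    ∀ (fuel : Nat) (i : Int), 1 ≤ i → i ≤ istar → istar ≤ i + fuel →
      maxK_loop traps i fuel = istar - 1 := by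
  intro fuel
  induction fuel with
  | zero =>
    intro i hi hle hf
    have : i = istar := by omega
    simp [maxK_loop, this]
  | succ n ih =>
    intro i hi hle hf
    unfold maxK_loop
    by_cases hfd : maxK_found traps i = true
    · have : istar ≤ i := (hfind i hi).mp hfd
      have hieq : i = istar := by omega
      rw [if_pos hfd, hieq]
    · have hni : ¬ istar ≤ i := fun hc => hfd ((hfind i hi).mpr hc)
      simp only [hfd, if_false, Bool.false_eq_true]
      exact ih (i + 1) (by omega) (by omega) (by push_cast at hf ⊢; omega)

theorem maxK_spec_aux (traps : List (Int × Int)) (hne : traps ≠ [])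
    (hnd : (traps.map Prod.fst).Nodup) : maxK traps = maxK_alt traps := by
  obtain ⟨m, hm⟩ : ∃ m, PySem.List.min? (traps.map maxK_bnd) (fun x => x) = some m := by
    cases h : PySem.List.min? (traps.map maxK_bnd) (fun x => x) with
    | none =>
      exact absurd (List.map_eq_nil_iff.mp ((PySem.List.min?_eq_none_iff (traps.map maxK_bnd) (fun x => x)).mp h)) hne
    | some m => exact ⟨m, rfl⟩
  have hmem : m ∈ traps.map maxK_bnd := PySem.List.min?_mem hm
  have hmin : ∀ y ∈ traps.map maxK_bnd, m ≤ y := by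
    intro y hy; exact PySem.List.min?_isMin hm y hy
  obtain ⟨p0, hp0, hbp0⟩ := List.mem_map.mp hmem
  have halt : maxK_alt traps = max 1 m - 1 := by
    unfold maxK_alt
    rw [show (traps.map (fun p => p.1 + max 1 (PySem.Int.floordiv (p.2 + 1) 2)))
          = traps.map maxK_bnd from rfl, hm]
    rfl
  have hfind : ∀ k : Int, 1 ≤ k → (maxK_found traps k = true ↔ max 1 m ≤ k) := by
    intro k hk
    rw [maxK_found_iff traps hnd k]
    constructor
    · rintro ⟨p, hp, hb⟩
      have := hmin (maxK_bnd p) (List.mem_map.mpr ⟨p, hp, rfl⟩)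
      omega
    · intro h
      exact ⟨p0, hp0, by omega⟩
  have hfuel : max 1 m ≤ 1 + (maxK_fuel traps : Int) := by
    unfold maxK_fuel
    have hF := (PySem.List.le_foldl_max (traps.map maxK_bnd) 1).2 m hmem
    have h1 := (PySem.List.le_foldl_max (traps.map maxK_bnd) 1).1
    have heq : (traps.map (fun p => p.1 + max 1 (PySem.Int.floordiv (p.2 + 1) 2)))
          = traps.map maxK_bnd := rfl
    rw [heq]
    omega
  rw [halt]
  unfold maxK
  exact maxK_loop_eq traps (max 1 m) hfind (maxK_fuel traps) 1 (by omega) (by omega) hfuel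

-- ===== VERDICT (by name: the statement is the Claim_ definition above) =====
theorem maxK_spec : Claim_equal_maxK := by
  intro traps _hdom hpre
  exact maxK_spec_aux traps hpre.1 hpre.2
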